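-- pv_equiv track=rewrite | github.com/CloudCoders/AdventOfCode2017 | llorens/day09/Day09Solver.py | assign_score
-- ===== SOURCE A (Python) =====
-- def assign_score(sequence, n):
--     score = n
--
--     open_brackets_count = 0
--     begin_nested_brackets = -1
--
--     for i in range(1,len(sequence)):
--
--         if sequence[i] == '{':
--             if open_brackets_count == 0:
--                 begin_nested_brackets = i
--             open_brackets_count += 1
--
--         if sequence[i] == '}':
--             open_brackets_count -= 1
--             if open_brackets_count == 0:
--                 score += assign_score(sequence[begin_nested_brackets: i+1], n+1)
--
--     return score
-- ===== SOURCE B (Python) =====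
-- def assign_score(sequence, n):
--     total = n
--     depth = 0
--     for c in sequence[1:]:
--         if c == '{':
--             total += n + 1 + depth
--             depth += 1
--         elif c == '}':
--             depth -= 1
--     return total
-- ===== Notes on version B (the rewrite author's own statement) =====
-- stated objective: faster
-- what changed: Replaced the recursion-on-sliced-substrings (each closed top-level group re-scanned by a recursive call on a fresh slice) with one linear pass that tracks the bracket depth and adds n+1+depth at every opening brace; Pre_ excludes sequences whose brackets after the first character leave a group unclosed or open a brace after an excess of closers, where A's value (unclosed groups score nothing, braces at negative depth are ignored) is an accident of its begin-index/skip bookkeeping.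
-- outside the precondition, e.g. on assign_score('x{', 0): A returns 0, B returns 1; on assign_score('{}{}', 5): A returns 5, B returns 10
import Mathlib
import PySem

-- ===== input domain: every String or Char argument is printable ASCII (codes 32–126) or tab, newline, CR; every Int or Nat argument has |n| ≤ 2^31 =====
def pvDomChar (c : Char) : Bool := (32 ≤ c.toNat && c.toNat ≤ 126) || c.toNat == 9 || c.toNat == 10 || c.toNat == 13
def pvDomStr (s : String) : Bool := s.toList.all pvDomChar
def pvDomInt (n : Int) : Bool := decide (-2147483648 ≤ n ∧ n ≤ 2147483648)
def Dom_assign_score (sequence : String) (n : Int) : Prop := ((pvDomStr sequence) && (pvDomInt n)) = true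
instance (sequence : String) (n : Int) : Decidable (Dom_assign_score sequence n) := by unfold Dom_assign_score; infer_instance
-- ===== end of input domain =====

-- B replaces A's recursion on sliced substrings by one linear depth-tracking pass (objective: faster).

-- ===== PORT A =====
-- the body of A's `for i in range(1, len(sequence))` loop; `slf` is the recursive call
def pvLoopA (slf : List Char → Int → Int) (s : List Char) (n : Int) :
    List Int → Int × Int × Int → Int
  | [], st => st.1
  | i :: rest, st =>
    let score := st.1
    let cnt := st.2.1
    let beg := st.2.2
    let c := PySem.List.pyGetD s i ' '   -- sequence[i]; i ∈ range(1, len) is always in range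
    let cnt1 := if c = '{' then cnt + 1 else cnt
    let beg1 := if c = '{' ∧ cnt = 0 then i else beg
    let cnt2 := if c = '}' then cnt1 - 1 else cnt1
    let score2 := if c = '}' ∧ cnt1 - 1 = 0 then
        score + slf (PySem.List.slice s (some beg1) (some (i + 1))) (n + 1) else score
    pvLoopA slf s n rest (score2, cnt2, beg1)

-- fuel is a totality device only: every recursive call of A is on a strictly shorter slice,
-- so `length + 1` fuel always suffices (proved inside the equivalence proof below)
def pvRunA : Nat → List Char → Int → Int
  | 0, _, n => n
  | f + 1, s, n => pvLoopA (pvRunA f) s n (PySem.List.pyRange 1 s.length 1) (n, 0, -1)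

def assign_score (sequence : String) (n : Int) : Int :=
  pvRunA (sequence.toList.length + 1) sequence.toList n

-- ===== PORT B =====
-- one step of B's loop over sequence[1:]; state = (total, depth)
def pvStepB (n : Int) (st : Int × Int) (c : Char) : Int × Int :=
  if c = '{' then (st.1 + n + 1 + st.2, st.2 + 1)
  else if c = '}' then (st.1, st.2 - 1)
  else st

def assign_score_alt (sequence : String) (n : Int) : Int :=
  (List.foldl (pvStepB n) (n, 0) (PySem.List.slice sequence.toList (some 1) none)).1

-- ===== PRECONDITION & SPEC =====
-- brace balance of a piece of text: openers minus closers
def pvBal (p : List Char) : Int := (p.count '{' : Int) - (p.count '}' : Int)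

-- Pre_ excludes sequences whose brackets after the first character leave a group unclosed or
-- open a brace after an excess of closers; on those inputs A's returned value is an accident of
-- its begin-index/skip bookkeeping (unclosed groups silently score nothing, braces opened at
-- negative depth are ignored), which no natural single-pass scorer reproduces.
def Pre_assign_score (sequence : String) (n : Int) : Prop :=
  (∀ i (h : i < (sequence.toList.drop 1).length),
      (sequence.toList.drop 1)[i] = '{' → 0 ≤ pvBal ((sequence.toList.drop 1).take i))
  ∧ pvBal (sequence.toList.drop 1) ≤ 0
instance (sequence : String) (n : Int) : Decidable (Pre_assign_score sequence n) := by
  unfold Pre_assign_score; infer_instance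

def pvWitness_assign_score : String × Int := ("{{},{x}}", 3)

def Spec_assign_score (sequence : String) (n : Int) (out : Int) : Prop := out = assign_score_alt sequence n
instance (sequence : String) (n : Int) (out : Int) : Decidable (Spec_assign_score sequence n out) := by unfold Spec_assign_score; infer_instance

-- ===== CLAIM (what is proved, stated in full; the proofs are below) =====
def Claim_equal_assign_score : Prop := ∀ (sequence : String) (n : Int), Dom_assign_score sequence n → Pre_assign_score sequence n → Spec_assign_score sequence n (assign_score sequence n)

-- ===== LEMMAS AND PROOFS =====

-- proof-side guarded fold: A's semantics as a single pass with state (total, depth, pending)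
def pvStepG (n : Int) (st : Int × Int × Int) (c : Char) : Int × Int × Int :=
  if c = '{' then
    (st.1, st.2.1 + 1, if 0 ≤ st.2.1 then st.2.2 + n + 1 + st.2.1 else st.2.2)
  else if c = '}' then
    if st.2.1 - 1 = 0 then (st.1 + st.2.2, st.2.1 - 1, 0)
    else (st.1, st.2.1 - 1, st.2.2)
  else st

def pvRunG (s : List Char) (n : Int) : Int :=
  (List.foldl (pvStepG n) (n, 0, 0) (PySem.List.slice s (some 1) none)).1

-- the guarded fold preserves "pending is 0 whenever depth ≤ 0"
theorem pvStepG_pz (n : Int) (st : Int × Int × Int) (c : Char)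
    (h : st.2.1 ≤ 0 → st.2.2 = 0) :
    (pvStepG n st c).2.1 ≤ 0 → (pvStepG n st c).2.2 = 0 := by
  obtain ⟨t, d, p⟩ := st
  simp only [pvStepG]
  split_ifs <;> simp_all <;> omega

theorem pvFold_pz (n : Int) (u : List Char) (st : Int × Int × Int)
    (h : st.2.1 ≤ 0 → st.2.2 = 0) :
    (List.foldl (pvStepG n) st u).2.1 ≤ 0 → (List.foldl (pvStepG n) st u).2.2 = 0 := by
  induction u generalizing st with
  | nil => simpa using h
  | cons c u ih => exact ih _ (pvStepG_pz n st c h)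

theorem pvExtract_snoc (s : List Char) (b k : Nat) (hbk : b ≤ k) (hk : k < s.length) :
    s.extract b (k + 1) = s.extract b k ++ [s[k]] := by
  have h1 : k + 1 - b = (k - b) + 1 := by omega
  simp [h1, List.take_add_one, List.getElem?_drop,
    Nat.add_sub_cancel' hbk, List.getElem?_eq_getElem hk]

-- the main loop invariant: A's loop agrees with the guarded fold
theorem pvLoop_main (m : Nat) (s : List Char) (n : Int) (slf : List Char → Int → Int)
    (hslf : ∀ u, u.length < s.length → slf u (n + 1) = pvRunG u (n + 1)) :
    ∀ (k : Nat) (total d beg pending : Int),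
      1 ≤ k → s.length ≤ k + m →
      (d ≤ 0 → pending = 0) →
      (1 ≤ d → 1 ≤ beg ∧ beg.toNat < k ∧
        (List.foldl (pvStepG (n + 1)) (n + 1, 0, 0) (s.extract (beg.toNat + 1) k)).2.1 = d - 1 ∧
        (List.foldl (pvStepG (n + 1)) (n + 1, 0, 0) (s.extract (beg.toNat + 1) k)).1 +
        (List.foldl (pvStepG (n + 1)) (n + 1, 0, 0) (s.extract (beg.toNat + 1) k)).2.2 = pending) →
      pvLoopA slf s n (PySem.List.pyRange (k : Int) (s.length : Int) 1) (total, d, beg) =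
        (List.foldl (pvStepG n) (total, d, pending) (s.drop k)).1 := by
  induction m with
  | zero =>
    intro k total d beg pending hk1 hkm hpz hbeg
    rw [PySem.List.pyRange_one_eq_nil (by exact_mod_cast hkm),
      List.drop_eq_nil_of_le (by omega)]
    simp [pvLoopA]
  | succ m ih =>
    intro k total d beg pending hk1 hkm hpz hbeg
    by_cases hlt : k < s.length
    · have hc : PySem.List.pyGetD s (k : Int) ' ' = s[k] := by
        rw [PySem.List.pyGetD_natCast]; exact List.getD_eq_getElem s ' ' hlt
      rw [PySem.List.pyRange_one_cons (by exact_mod_cast hlt),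
        List.drop_eq_getElem_cons hlt, List.foldl_cons]
      have hcast : ((k : Int) + 1) = ((k + 1 : Nat) : Int) := by push_cast; ring
      have cNO : ¬ (('{' : Char) = '}') := by decide
      have cNO' : ¬ (('}' : Char) = '{') := by decide
      by_cases h1 : s[k] = '{'
      · have h2 : s[k] ≠ '}' := by rw [h1]; decide
        by_cases hd0 : d = 0
        · -- a new top-level group starts at index k
          have hp0 : pending = 0 := hpz (le_of_eq hd0)
          subst hd0
          simp only [pvLoopA, hc, h1, hp0, pvStepG]
          norm_num
          simp only [if_neg cNO]
          rw [hcast]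
          refine ih (k + 1) total 1 (k : Int) (n + 1) (by omega) (by omega) (by omega) ?_
          intro _
          refine ⟨by exact_mod_cast hk1, by simp, ?_, ?_⟩ <;>
            simp [List.extract_eq_take_drop]
        · by_cases hd1 : 1 ≤ d
          · -- inside an open group: the open brace joins the pending group
            obtain ⟨hb1, hb2, hin1, hin2⟩ := hbeg hd1
            simp only [pvLoopA, hc, h1, pvStepG]
            norm_num [hd0, (by omega : (0:Int) ≤ d)]
            simp only [if_neg cNO]
            rw [hcast]
            refine ih (k + 1) total (d + 1) beg (pending + n + 1 + d) (by omega) (by omega)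
              (by omega) ?_
            intro _
            rw [pvExtract_snoc s _ k (by omega) hlt, List.foldl_append]
            generalize hX : List.foldl (pvStepG (n + 1)) (n + 1, 0, 0)
              (s.extract (beg.toNat + 1) k) = X at hin1 hin2
            obtain ⟨T, D, P⟩ := X
            simp only at hin1 hin2
            subst hin1
            simp only [List.foldl_cons, List.foldl_nil, h1, pvStepG,
              if_pos (by omega : (0 : Int) ≤ d - 1)]
            refine ⟨hb1, by omega, by simp, by simp; omega⟩
          · -- negative depth: the brace is counted by neither program
            have hp0 : pending = 0 := hpz (by omega)
            simp only [pvLoopA, hc, h1, hp0, pvStepG]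
            norm_num [hd0]
            simp only [if_neg cNO, if_neg (show ¬ (0:Int) ≤ d by omega)]
            rw [hcast]
            exact ih (k + 1) total (d + 1) beg 0 (by omega) (by omega)
              (fun _ => rfl) (by omega)
      · by_cases h2 : s[k] = '}'
        · by_cases hd1 : d = 1
          · -- the current top-level group closes: A recurses on the slice, the fold commits pending
            subst hd1
            obtain ⟨hb1, hb2, hin1, hin2⟩ := hbeg le_rfl
            have hP0 : (List.foldl (pvStepG (n + 1)) (n + 1, 0, 0)
                (s.extract (beg.toNat + 1) k)).2.2 = 0 :=
              pvFold_pz _ _ _ (by simp) (by rw [hin1]; norm_num)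
            have hslice : PySem.List.slice s (some beg) (some ((k : Int) + 1)) =
                s.extract beg.toNat (k + 1) := by
              rw [PySem.List.slice_toNat s (by omega) (by omega), hcast,
                Int.toNat_natCast, List.extract_eq_take_drop]
            have hlen : (s.extract beg.toNat (k + 1)).length < s.length := by
              rw [List.extract_eq_take_drop]
              simp only [List.length_take, List.length_drop]
              omega
            have hrec : slf (PySem.List.slice s (some beg) (some ((k : Int) + 1))) (n + 1)
                = pending := by
              rw [hslice, hslf _ hlen]
              unfold pvRunG
              rw [PySem.List.slice_from _ (by norm_num)]
              have hdt : (s.extract beg.toNat (k + 1)).drop (Int.toNat 1) =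
                  s.extract (beg.toNat + 1) (k + 1) := by
                rw [List.extract_eq_take_drop, List.extract_eq_take_drop,
                  show Int.toNat 1 = 1 from rfl, List.drop_take, List.drop_drop]
                congr 1
              rw [hdt, pvExtract_snoc s _ k (by omega) hlt, List.foldl_append]
              generalize hX : List.foldl (pvStepG (n + 1)) (n + 1, 0, 0)
                (s.extract (beg.toNat + 1) k) = X at hin1 hin2 hP0
              obtain ⟨T, D, P⟩ := X
              simp only at hin1 hin2 hP0
              subst hP0
              simp only [List.foldl_cons, List.foldl_nil, h2, pvStepG, if_neg cNO', hin1]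
              norm_num
              omega
            simp only [pvLoopA, hc, h2, pvStepG, if_neg cNO']
            norm_num
            rw [hrec, hcast]
            refine (ih (k + 1) (total + pending) 0 beg 0 (by omega) (by omega)
              (fun _ => rfl) (by omega)).trans ?_
            norm_num
          · -- depth ≠ 1: no group closes here
            simp only [pvLoopA, hc, h2, pvStepG, if_neg cNO']
            norm_num
            simp only [if_neg (show ¬ d - 1 = 0 by omega),
              if_neg (show ¬ (('}' : Char) = '{' ∧ d = 0) from fun h => cNO' h.1)]
            rw [hcast]
            by_cases hd2 : 2 ≤ d
            · obtain ⟨hb1, hb2, hin1, hin2⟩ := hbeg (by omega)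
              refine ih (k + 1) total (d - 1) beg pending (by omega) (by omega)
                (by omega) ?_
              intro _
              rw [pvExtract_snoc s _ k (by omega) hlt, List.foldl_append]
              generalize hX : List.foldl (pvStepG (n + 1)) (n + 1, 0, 0)
                (s.extract (beg.toNat + 1) k) = X at hin1 hin2
              obtain ⟨T, D, P⟩ := X
              simp only at hin1 hin2
              subst hin1
              simp only [List.foldl_cons, List.foldl_nil, h2, pvStepG, if_neg cNO']
              refine ⟨hb1, by omega, ?_, ?_⟩ <;> split_ifs <;> simp <;> omega
            · have hp0 : pending = 0 := hpz (by omega)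
              exact ih (k + 1) total (d - 1) beg pending (by omega) (by omega)
                (fun _ => hp0) (by omega)
        · -- any other character: both programs skip it
          simp only [pvLoopA, hc, pvStepG, if_neg h1, if_neg h2,
            if_neg (show ¬ (s[k] = '{' ∧ d = 0) from fun h => h1 h.1),
            if_neg (show ¬ (s[k] = '}' ∧ d - 1 = 0) from fun h => h2 h.1)]
          rw [hcast]
          refine ih (k + 1) total d beg pending (by omega) (by omega) hpz ?_
          intro hd1
          obtain ⟨hb1, hb2, hin1, hin2⟩ := hbeg hd1
          rw [pvExtract_snoc s _ k (by omega) hlt, List.foldl_append]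
          refine ⟨hb1, by omega, ?_, ?_⟩ <;>
            simp only [List.foldl_cons, List.foldl_nil, pvStepG, if_neg h1, if_neg h2] <;>
            [exact hin1; exact hin2]
    · rw [PySem.List.pyRange_one_eq_nil (by exact_mod_cast (by omega : s.length ≤ k)),
        List.drop_eq_nil_of_le (by omega)]
      simp [pvLoopA]

theorem pvMain (f : Nat) : ∀ (s : List Char) (n : Int), s.length < f →
    pvRunA f s n = pvRunG s n := by
  induction f with
  | zero => intro s n h; omega
  | succ f ih =>
    intro s n h
    have H := pvLoop_main s.length s n (pvRunA f)
      (fun u hu => ih u (n + 1) (by omega)) 1 n 0 (-1) 0 le_rfl (by omega)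
      (fun _ => rfl) (by omega)
    simp only [Nat.cast_one] at H
    simp only [pvRunA]
    rw [H]
    unfold pvRunG
    rw [PySem.List.slice_from _ (by norm_num)]
    norm_num

theorem pvBal_nil : pvBal [] = 0 := by simp [pvBal]

theorem pvBal_cons (c : Char) (u : List Char) :
    pvBal (c :: u) = (if c = '{' then 1 else if c = '}' then -1 else 0) + pvBal u := by
  simp only [pvBal, List.count_cons]
  split_ifs with h1 h2 <;> simp_all <;> omega

-- under Pre_'s bracket conditions the guarded fold and B's plain fold agree
theorem pvFoldGN (n : Int) : ∀ (u : List Char) (T d P : Int),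
    (d ≤ 0 → P = 0) →
    (∀ i (h : i < u.length), u[i] = '{' → 0 ≤ d + pvBal (u.take i)) →
    d + pvBal u ≤ 0 →
    (List.foldl (pvStepG n) (T, d, P) u).1 =
    (List.foldl (pvStepB n) (T + P, d) u).1 := by
  intro u
  induction u with
  | nil =>
    intro T d P hpz _ hend
    rw [pvBal_nil] at hend
    simp [hpz (by omega)]
  | cons c u ih =>
    intro T d P hpz hopen hend
    rw [pvBal_cons] at hend
    have hop : ∀ i (hi : i < u.length), u[i] = '{' →
        0 ≤ (d + (if c = '{' then 1 else if c = '}' then -1 else 0)) + pvBal (u.take i) := by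
      intro i hi hu
      have := hopen (i + 1) (by simpa using Nat.succ_lt_succ hi) (by simpa using hu)
      rw [List.take_succ_cons, pvBal_cons] at this
      omega
    by_cases h1 : c = '{'
    · subst h1
      have hd0 : 0 ≤ d := by
        have := hopen 0 (by simp) (by simp)
        simpa [pvBal_nil] using this
      simp only [reduceIte] at hop hend
      simp only [List.foldl_cons, pvStepG, pvStepB, reduceIte, if_pos hd0]
      have heq : T + P + n + 1 + d = T + (P + n + 1 + d) := by ring
      rw [heq]
      have hop' : ∀ i (hi : i < u.length), u[i] = '{' → 0 ≤ (d + 1) + pvBal (u.take i) := by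
        intro i hi hu
        have h := hop i hi hu
        omega
      exact ih T (d + 1) (P + n + 1 + d) (fun h => absurd h (by omega)) hop' (by omega)
    · by_cases h2 : c = '}'
      · subst h2
        simp only [if_neg (show ¬ (('}' : Char) = '{') by decide), reduceIte] at hop hend
        have hop' : ∀ i (hi : i < u.length), u[i] = '{' → 0 ≤ (d - 1) + pvBal (u.take i) := by
          intro i hi hu
          have h := hop i hi hu
          omega
        have hend' : (d - 1) + pvBal u ≤ 0 := by omega
        simp only [List.foldl_cons, pvStepG, pvStepB, reduceIte]
        by_cases hd1 : d - 1 = 0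
        · rw [if_pos hd1]
          have := ih (T + P) (d - 1) 0 (fun _ => rfl) hop' hend'
          simpa using this
        · rw [if_neg hd1]
          exact ih T (d - 1) P (fun h => hpz (by omega)) hop' hend'
      · simp only [if_neg h1, if_neg h2] at hop hend
        have hop' : ∀ i (hi : i < u.length), u[i] = '{' → 0 ≤ d + pvBal (u.take i) := by
          intro i hi hu
          have h := hop i hi hu
          omega
        simp only [List.foldl_cons, pvStepG, pvStepB, if_neg h1, if_neg h2]
        exact ih T d P hpz hop' (by omega)

-- ===== VERDICT (by name: the statement is the Claim_ definition above) =====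
theorem assign_score_spec : Claim_equal_assign_score := by
  intro s n _ hpre
  unfold Spec_assign_score assign_score assign_score_alt
  rw [pvMain _ s.toList n (Nat.lt_succ_self _)]
  unfold pvRunG
  rw [PySem.List.slice_from _ (by norm_num)]
  obtain ⟨h1, h2⟩ := hpre
  have := pvFoldGN n (s.toList.drop 1) n 0 0 (fun _ => rfl)
    (by simpa using h1) (by simpa using h2)
  simpa using this
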